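-- pv_equiv track=rewrite | github.com/jglotzer/WordRefAnkiNoteCreate | WordRefAnkiNoteCreate.py | gen_examples_for_connect
-- ===== SOURCE A (Python) =====
-- yellow  = '#FCE94F'
--
-- def gen_examples_for_connect(translations, invert):
--     return_str=f"<i><font color={yellow}><br>\n"
--     for value in translations.values():
--         for examples_list in value["examples"]:
--             for example_index in range(len(examples_list)):
--                 # Only want French examples, not English translations.
--                 # This means example_index of 0 in non invert case.
--                 # or example_index non-zero in invert case.
--                 if (not example_index and not invert) or (example_index and invert):
--                     # Can have multiple phrases separated by a double space.
--                     return_str += examples_list[example_index].replace("  ", "\n") + "\n"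
--     return_str += "</font></i></pre>" # close tags.
--     return return_str.replace('"', "&quot;") # Protect JSON from double quotes by encoding them.
-- ===== SOURCE B (Python) =====
-- yellow  = '#FCE94F'
--
-- def _escape(phrase):
--     # One character-level pass doing BOTH rewrites at once:
--     # a double space becomes a newline, a double quote becomes &quot;.
--     out = []
--     i = 0
--     n = len(phrase)
--     while i < n:
--         if phrase[i] == ' ' and i + 1 < n and phrase[i + 1] == ' ':
--             out.append('\n')
--             i += 2
--         elif phrase[i] == '"':
--             out.append('&quot;')
--             i += 1
--         else:
--             out.append(phrase[i])
--             i += 1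
--     return ''.join(out)
--
-- def _body(values, invert):
--     # Recursive, built back-to-front: render the tail first, prepend this entry's pieces.
--     if not values:
--         return "</font></i></pre>"
--     head, rest = values[0], values[1:]
--     tail = _body(rest, invert)
--     pieces = []
--     for examples_list in head["examples"]:
--         if examples_list:
--             first, *others = examples_list
--             chosen = others if invert else [first]
--         else:
--             chosen = []
--         for phrase in chosen:
--             pieces.append(_escape(phrase) + "\n")
--     return ''.join(pieces) + tail
--
-- def gen_examples_for_connect(translations, invert):
--     return f"<i><font color={yellow}><br>\n" + _body(list(translations.values()), invert)
-- ===== Notes on version B (the rewrite author's own statement) =====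
-- stated objective: alternative
-- what changed: A's triple nested loop with an index-parity predicate and two whole-string str.replace passes is replaced by a recursive back-to-front assembly over the entries plus a single character-level scan per phrase that performs both rewrites (double space to newline, quote to &quot;) in one pass, so no str.replace and no global post-pass remain.
import Mathlib
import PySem

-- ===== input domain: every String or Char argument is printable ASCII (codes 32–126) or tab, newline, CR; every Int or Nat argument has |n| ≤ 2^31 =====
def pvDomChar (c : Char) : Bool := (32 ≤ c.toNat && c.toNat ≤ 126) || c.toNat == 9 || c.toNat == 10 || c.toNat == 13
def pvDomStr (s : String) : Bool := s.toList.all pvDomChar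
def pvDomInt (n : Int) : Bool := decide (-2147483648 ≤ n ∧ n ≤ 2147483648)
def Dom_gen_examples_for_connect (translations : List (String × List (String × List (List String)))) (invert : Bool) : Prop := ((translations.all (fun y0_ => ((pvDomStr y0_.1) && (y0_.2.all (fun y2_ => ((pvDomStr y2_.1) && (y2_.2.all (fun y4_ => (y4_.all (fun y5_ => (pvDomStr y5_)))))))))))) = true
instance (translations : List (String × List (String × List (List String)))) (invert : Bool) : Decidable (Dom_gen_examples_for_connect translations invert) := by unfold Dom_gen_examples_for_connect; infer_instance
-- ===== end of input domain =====

-- B replaces A's triple nested loop (index-parity predicate, two whole-string str.replace passes)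
-- by a recursive back-to-front assembly over the entries plus a single character-level scan per
-- phrase doing both rewrites at once (objective: alternative; same asymptotic cost).

-- ===== PORT A =====
def pvYellow : String := "#FCE94F"

def gen_examples_for_connect (translations : List (String × List (String × List (List String)))) (invert : Bool) : String :=
  PySem.Str.replace
    ((translations.foldl (fun acc kv =>
      match PySem.Dict.get? (⟨kv.2⟩ : PySem.Dict String (List (List String))) "examples" with
      | none => acc   -- Python raises KeyError here; such inputs are excluded by Pre_
      | some exampleLists => exampleLists.foldl (fun acc examples_list =>
          (PySem.List.pyRange 0 (PySem.List.len examples_list)).foldl (fun acc i =>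
            if (decide (i = 0) && !invert) || (!decide (i = 0) && invert) then
              acc ++ (PySem.Str.replace (PySem.List.pyGetD examples_list i "") "  " "\n" ++ "\n")
            else acc) acc) acc)
      ("<i><font color=" ++ pvYellow ++ "><br>\n")) ++ "</font></i></pre>")
    "\"" "&quot;"

-- ===== PORT B =====
-- _escape: the index-based while loop of Source B, transcribed as the obvious structural recursion
-- on the character list (looking one character ahead, exactly like phrase[i+1]).
def pvEscape : List Char → List Char
  | [] => []
  | [c] => if c = '"' then "&quot;".toList else [c]
  | c :: c2 :: t =>
    if c = ' ' && c2 = ' ' then '\n' :: pvEscape t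
    else if c = '"' then "&quot;".toList ++ pvEscape (c2 :: t)
    else c :: pvEscape (c2 :: t)

-- the 'if examples_list: first,*others = examples_list; chosen = others if invert else [first]'
-- selection of Source B
def pvChoose : List String → Bool → List String
  | [], _ => []
  | first :: others, invert => if invert then others else [first]

-- _body: recursive back-to-front assembly; ''.join of the per-entry pieces done on char lists.
def pvBody : List (String × List (String × List (List String))) → Bool → List Char
  | [], _ => "</font></i></pre>".toList
  | kv :: rest, invert =>
      let tail := pvBody rest invert
      let pieces : List (List Char) :=
        match PySem.Dict.get? (⟨kv.2⟩ : PySem.Dict String (List (List String))) "examples" with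
        | none => []   -- Python raises KeyError here; such inputs are excluded by Pre_
        | some exampleLists => exampleLists.foldl (fun ps examples_list =>
            ps ++ (pvChoose examples_list invert).map
                    (fun phrase => pvEscape (String.toList phrase) ++ ['\n'])) []
      pieces.flatten ++ tail

def gen_examples_for_connect_alt (translations : List (String × List (String × List (List String)))) (invert : Bool) : String :=
  String.ofList ("<i><font color=#FCE94F><br>\n".toList ++ pvBody translations invert)

-- ===== PRECONDITION & SPEC =====
-- Pre_ excludes exactly the inputs where some inner dict lacks the key "examples": there the
-- Python (A and B alike) raises KeyError.
def Pre_gen_examples_for_connect (translations : List (String × List (String × List (List String)))) (invert : Bool) : Prop :=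
  (translations.all (fun kv => (PySem.Dict.get? (⟨kv.2⟩ : PySem.Dict String (List (List String))) "examples").isSome)) = true
instance (translations : List (String × List (String × List (List String)))) (invert : Bool) : Decidable (Pre_gen_examples_for_connect translations invert) := by unfold Pre_gen_examples_for_connect; infer_instance

def pvWitness_gen_examples_for_connect : (List (String × List (String × List (List String)))) × Bool :=
  ([("chat", [("examples", [["le chat  the cat", "the cat"]])])], false)

def Spec_gen_examples_for_connect (translations : List (String × List (String × List (List String)))) (invert : Bool) (out : String) : Prop := out = gen_examples_for_connect_alt translations invert
instance (translations : List (String × List (String × List (List String)))) (invert : Bool) (out : String) : Decidable (Spec_gen_examples_for_connect translations invert out) := by unfold Spec_gen_examples_for_connect; infer_instance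

-- ===== CLAIM (what is proved, stated in full; the proofs are below) =====
def Claim_equal_gen_examples_for_connect : Prop := ∀ (translations : List (String × List (String × List (List String)))) (invert : Bool), Dom_gen_examples_for_connect translations invert → Pre_gen_examples_for_connect translations invert → Spec_gen_examples_for_connect translations invert (gen_examples_for_connect translations invert)

-- ===== LEMMAS AND PROOFS =====

def pvG (p : String) : String := PySem.Str.replace p "  " "\n" ++ "\n"
def pvSel (invert : Bool) (ex : List String) : List String := if invert then ex.drop 1 else ex.take 1
def pvHB (invert : Bool) (kv : String × List (String × List (List String))) : List String :=
  match PySem.Dict.get? (⟨kv.2⟩ : PySem.Dict String (List (List String))) "examples" with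
  | none => []
  | some exampleLists => exampleLists.flatMap (fun ex => (pvSel invert ex).map pvG)

lemma sjoin_nil : PySem.Str.join "" ([] : List String) = "" := rfl

lemma sjoin_cons (x : String) (xs : List String) :
    PySem.Str.join "" (x :: xs) = x ++ PySem.Str.join "" xs := by
  apply String.toList_inj.mp
  cases xs with
  | nil => simp [PySem.Str.toList_join, PySem.Chars.join_singleton, PySem.Chars.join_nil]
  | cons y ys =>
      simp [PySem.Str.toList_join, PySem.Chars.join_cons_cons]

lemma sjoin_append (xs ys : List String) :
    PySem.Str.join "" (xs ++ ys) = PySem.Str.join "" xs ++ PySem.Str.join "" ys := by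
  induction xs with
  | nil => simp [sjoin_nil]
  | cons x xs ih => simp [sjoin_cons, ih, String.append_assoc]

lemma foldl_append_pvG (l : List String) (acc : String) :
    l.foldl (fun a s => a ++ (PySem.Str.replace s "  " "\n" ++ "\n")) acc
      = acc ++ PySem.Str.join "" (l.map pvG) := by
  induction l generalizing acc with
  | nil => simp [sjoin_nil]
  | cons x xs ih => simp [ih, sjoin_cons, pvG, String.append_assoc]

lemma foldl_skip (l : List Int) (acc : String) :
    List.foldl (fun (a : String) (_ : Int) => a) acc l = acc := by
  induction l generalizing acc with
  | nil => rfl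
  | cons x xs ih => simp only [List.foldl_cons]; exact ih acc

lemma tail_fold (invert : Bool) (ex : List String) (init : String) :
    List.foldl (fun acc i =>
        if (decide (i = 0) && !invert) || (!decide (i = 0) && invert) then
          acc ++ (PySem.Str.replace (PySem.List.pyGetD ex i "") "  " "\n" ++ "\n")
        else acc) init (PySem.List.pyRange 1 (PySem.List.len ex))
      = init ++ (if invert then PySem.Str.join "" ((ex.drop 1).map pvG) else "") := by
  have hcongr := PySem.List.foldl_congr_mem (PySem.List.pyRange 1 (PySem.List.len ex))
    (fun acc i =>
        if (decide (i = 0) && !invert) || (!decide (i = 0) && invert) then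
          acc ++ (PySem.Str.replace (PySem.List.pyGetD ex i "") "  " "\n" ++ "\n")
        else acc)
    (fun acc i =>
        if invert then acc ++ (PySem.Str.replace (PySem.List.pyGetD ex i "") "  " "\n" ++ "\n")
        else acc) init ?_
  · rw [hcongr]
    cases invert with
    | false =>
        simpa using foldl_skip (PySem.List.pyRange 1 (PySem.List.len ex)) init
    | true =>
        simp only [if_true]
        rw [PySem.List.foldl_pyRange_pyGetD ex ""
          (fun a s => a ++ (PySem.Str.replace s "  " "\n" ++ "\n")) init (by norm_num : (0:Int) ≤ 1)]
        simpa using foldl_append_pvG (ex.drop 1) init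
  · intro acc i hi
    have h1 : (1:Int) ≤ i := (PySem.List.mem_pyRange_one.mp hi).1
    have hd : decide (i = 0) = false := by simp; omega
    cases invert <;> simp [hd]

lemma inner_eq (invert : Bool) (ex : List String) (acc : String) :
    (PySem.List.pyRange 0 (PySem.List.len ex)).foldl (fun acc i =>
        if (decide (i = 0) && !invert) || (!decide (i = 0) && invert) then
          acc ++ (PySem.Str.replace (PySem.List.pyGetD ex i "") "  " "\n" ++ "\n")
        else acc) acc
      = acc ++ PySem.Str.join "" ((pvSel invert ex).map pvG) := by
  cases ex with
  | nil =>
      have hr : PySem.List.pyRange 0 (PySem.List.len ([] : List String)) = [] := rfl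
      rw [hr]
      cases invert <;> simp [pvSel, sjoin_nil]
  | cons x rest =>
      have hlt : (0:Int) < PySem.List.len (x :: rest) := by
        simp [PySem.List.len]
      rw [PySem.List.pyRange_one_cons hlt]
      simp only [List.foldl_cons, zero_add]
      rw [tail_fold]
      cases invert with
      | false => simp [pvSel, pvG, sjoin_cons, sjoin_nil, PySem.List.pyGetD]
      | true => simp [pvSel]

lemma exs_eq (invert : Bool) (exs : List (List String)) (acc : String) :
    exs.foldl (fun acc examples_list =>
        (PySem.List.pyRange 0 (PySem.List.len examples_list)).foldl (fun acc i =>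
          if (decide (i = 0) && !invert) || (!decide (i = 0) && invert) then
            acc ++ (PySem.Str.replace (PySem.List.pyGetD examples_list i "") "  " "\n" ++ "\n")
          else acc) acc) acc
      = acc ++ PySem.Str.join "" (exs.flatMap (fun ex => (pvSel invert ex).map pvG)) := by
  induction exs generalizing acc with
  | nil => simp [sjoin_nil]
  | cons ex exs ih =>
      simp only [List.foldl_cons]
      rw [inner_eq, ih, List.flatMap_cons, sjoin_append, String.append_assoc]

lemma outerA (invert : Bool) (l : List (String × List (String × List (List String)))) (acc : String) :
    l.foldl (fun acc kv =>
      match PySem.Dict.get? (⟨kv.2⟩ : PySem.Dict String (List (List String))) "examples" with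
      | none => acc
      | some exampleLists => exampleLists.foldl (fun acc examples_list =>
          (PySem.List.pyRange 0 (PySem.List.len examples_list)).foldl (fun acc i =>
            if (decide (i = 0) && !invert) || (!decide (i = 0) && invert) then
              acc ++ (PySem.Str.replace (PySem.List.pyGetD examples_list i "") "  " "\n" ++ "\n")
            else acc) acc) acc) acc
      = acc ++ PySem.Str.join "" (l.flatMap (pvHB invert)) := by
  induction l generalizing acc with
  | nil => simp [sjoin_nil]
  | cons kv l ih =>
      simp only [List.foldl_cons]
      rcases h : PySem.Dict.get? (⟨kv.2⟩ : PySem.Dict String (List (List String))) "examples" with _ | exs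
      · dsimp only
        rw [ih, List.flatMap_cons]
        simp only [pvHB, h]
        simp
      · dsimp only
        rw [exs_eq, ih, List.flatMap_cons]
        simp only [pvHB, h]
        rw [sjoin_append, String.append_assoc]

-- ---- character-level layer: Chars.replace characterisations ----

lemma go_acc (old new : List Char) : ∀ (f : Nat) (l acc : List Char),
    PySem.Chars.replace.go old new f l acc = acc.reverse ++ PySem.Chars.replace.go old new f l [] := by
  intro f
  induction f with
  | zero => intro l acc; simp [PySem.Chars.replace.go]
  | succ f ih =>
      intro l acc
      cases l with
      | nil => simp [PySem.Chars.replace.go]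
      | cons c t =>
          simp only [PySem.Chars.replace.go]
          by_cases hp : old.isPrefixOf (c :: t)
          · simp only [hp, if_true]
            rw [ih _ (new.reverse ++ acc), ih _ (new.reverse ++ [])]
            simp
          · simp only [hp]
            rw [ih t (c :: acc), ih t (c :: [])]
            simp

lemma go_fuel (old new : List Char) (hold : old ≠ []) : ∀ (f : Nat) (l acc : List Char),
    l.length ≤ f → PySem.Chars.replace.go old new f l acc = PySem.Chars.replace.go old new l.length l acc := by
  intro f
  induction f using Nat.strong_induction_on with
  | _ f ih =>
      intro l acc hl
      cases f with
      | zero =>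
          have : l = [] := List.eq_nil_of_length_eq_zero (Nat.le_zero.mp hl)
          subst this; rfl
      | succ f =>
          cases l with
          | nil => simp [PySem.Chars.replace.go]
          | cons c t =>
              simp only [PySem.Chars.replace.go, List.length_cons]
              have h1 : 1 ≤ old.length := by
                cases old with
                | nil => exact absurd rfl hold
                | cons _ _ => simp
              have hl' : t.length ≤ f := by simp at hl; omega
              by_cases hp : old.isPrefixOf (c :: t)
              · simp only [hp, if_true]
                have hlen : (List.drop old.length (c :: t)).length ≤ f := by
                  simp only [List.length_drop, List.length_cons]; omega
                have hlen2 : (List.drop old.length (c :: t)).length ≤ t.length := by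
                  simp only [List.length_drop, List.length_cons]; omega
                rw [ih f (by omega) _ _ hlen, ih t.length (by omega) _ _ hlen2]
              · simp only [hp, Bool.false_eq_true, if_false]
                rw [ih f (by omega) t _ hl']

lemma replace_nil (old new : List Char) (hold : old ≠ []) :
    PySem.Chars.replace [] old new = [] := by
  simp [PySem.Chars.replace, List.isEmpty_eq_false_iff.mpr hold, PySem.Chars.replace.go]

lemma replace_cons (old new : List Char) (hold : old ≠ []) (c : Char) (t : List Char) :
    PySem.Chars.replace (c :: t) old new =
      if old.isPrefixOf (c :: t) then new ++ PySem.Chars.replace (List.drop old.length (c :: t)) old new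
      else c :: PySem.Chars.replace t old new := by
  have hne : old.isEmpty = false := List.isEmpty_eq_false_iff.mpr hold
  simp only [PySem.Chars.replace, hne, Bool.false_eq_true, if_false]
  conv_lhs => rw [show (c :: t).length = t.length + 1 from rfl]
  simp only [PySem.Chars.replace.go]
  by_cases hp : old.isPrefixOf (c :: t)
  · simp only [hp, if_true]
    rw [go_acc, go_fuel old new hold t.length _ []
      (by have : 1 ≤ old.length := by cases old with | nil => exact absurd rfl hold | cons _ _ => simp
          simp [List.length_drop]; omega)]
    simp
  · simp only [hp]
    rw [go_acc, go_fuel old new hold t.length t [c] (by omega)]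
    rw [go_acc old new t.length t [c]]
    simp

def pvQ : List Char := "&quot;".toList

lemma qrep_eq_flatMap (cs : List Char) :
    PySem.Chars.replace cs ['"'] pvQ = cs.flatMap (fun c => if c = '"' then pvQ else [c]) := by
  induction cs with
  | nil => simp [replace_nil]
  | cons c t ih =>
      rw [replace_cons _ _ (by simp) c t]
      by_cases hc : c = '"'
      · subst hc
        simp [List.isPrefixOf, ih]
      · have hp : ¬ (['"'].isPrefixOf (c :: t)) := by
          simp [List.isPrefixOf]; intro h; exact absurd h.symm hc
        simp [hp, hc, ih]

lemma qrep_append (a b : List Char) :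
    PySem.Chars.replace (a ++ b) ['"'] pvQ
      = PySem.Chars.replace a ['"'] pvQ ++ PySem.Chars.replace b ['"'] pvQ := by
  simp [qrep_eq_flatMap]

lemma qrep_cons (c : Char) (x : List Char) :
    PySem.Chars.replace (c :: x) ['"'] pvQ
      = (if c = '"' then pvQ else [c]) ++ PySem.Chars.replace x ['"'] pvQ := by
  simp [qrep_eq_flatMap]

lemma srep_nil : PySem.Chars.replace [] [' ', ' '] ['\n'] = [] :=
  replace_nil _ _ (by simp)

lemma srep_one (c : Char) : PySem.Chars.replace [c] [' ', ' '] ['\n'] = [c] := by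
  rw [replace_cons _ _ (by simp) c []]
  have hp : ¬ ([' ', ' '].isPrefixOf [c]) = true := by simp [List.isPrefixOf]
  simp [hp, srep_nil]

lemma srep_cons₂ (c c2 : Char) (t : List Char) :
    PySem.Chars.replace (c :: c2 :: t) [' ', ' '] ['\n']
      = if c = ' ' ∧ c2 = ' ' then '\n' :: PySem.Chars.replace t [' ', ' '] ['\n']
        else c :: PySem.Chars.replace (c2 :: t) [' ', ' '] ['\n'] := by
  rw [replace_cons _ _ (by simp) c (c2 :: t)]
  by_cases h : c = ' ' ∧ c2 = ' '
  · obtain ⟨h1, h2⟩ := h; subst h1; subst h2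
    simp [List.isPrefixOf]
  · have hp : ([' ', ' '].isPrefixOf (c :: c2 :: t)) = false := by
      simp [List.isPrefixOf]; intro h1 h2; exact h ⟨h1.symm, h2.symm⟩
    simp [hp, h]

-- the one-pass scan equals the two composed replaces, per phrase
lemma escape_eq (cs : List Char) :
    PySem.Chars.replace (PySem.Chars.replace cs [' ', ' '] ['\n']) ['"'] pvQ = pvEscape cs := by
  induction cs using pvEscape.induct with
  | case1 => simp [replace_nil, pvEscape]
  | case2 =>
      rw [srep_one, qrep_cons]
      simp [replace_nil _ _ (show (['"'] : List Char) ≠ [] by simp), pvEscape, pvQ]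
  | case3 c hc =>
      rw [srep_one, qrep_cons]
      simp [replace_nil _ _ (show (['"'] : List Char) ≠ [] by simp), pvEscape, hc]
  | case4 c c2 t hss ih =>
      obtain ⟨h1, h2⟩ : c = ' ' ∧ c2 = ' ' := by simpa using hss
      subst h1; subst h2
      rw [srep_cons₂, if_pos (⟨rfl, rfl⟩ : (' ':Char) = ' ' ∧ (' ':Char) = ' '), qrep_cons]
      simp [pvEscape, ih]
  | case5 c2 t hss ih =>
      rw [srep_cons₂]
      have h : ¬ (('"' : Char) = ' ' ∧ c2 = ' ') := by simp
      simp only [if_neg h]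
      rw [qrep_cons, ih]
      have hb : (decide (('"' : Char) = ' ') && decide (c2 = ' ')) = false := by
        simpa using hss
      simp [pvEscape, pvQ]
  | case6 c c2 t hss hc ih =>
      rw [srep_cons₂]
      have h : ¬ (c = ' ' ∧ c2 = ' ') := by
        intro h; exact hss (by simp [h.1, h.2])
      simp only [if_neg h]
      rw [qrep_cons, ih]
      have hb : (decide (c = ' ') && decide (c2 = ' ')) = false := by simpa using hss
      simp [pvEscape, hb, hc]

lemma join0_flatten (ps : List (List Char)) :
    PySem.Chars.join [] ps = ps.flatten := by
  induction ps with
  | nil => simp [PySem.Chars.join_nil]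
  | cons p ps ih =>
      cases ps with
      | nil => simp [PySem.Chars.join_singleton]
      | cons q qs => simp [PySem.Chars.join_cons_cons, ih]

lemma qrep_flatten (ps : List (List Char)) :
    PySem.Chars.replace ps.flatten ['"'] pvQ
      = (ps.map (fun p => PySem.Chars.replace p ['"'] pvQ)).flatten := by
  induction ps with
  | nil => simp [replace_nil]
  | cons p ps ih => simp [qrep_append, ih]

def pvHBC (invert : Bool) (kv : String × List (String × List (List String))) : List (List Char) :=
  match PySem.Dict.get? (⟨kv.2⟩ : PySem.Dict String (List (List String))) "examples" with
  | none => []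
  | some exampleLists => exampleLists.flatMap (fun ex =>
      (pvSel invert ex).map (fun phrase => pvEscape (String.toList phrase) ++ ['\n']))

lemma sel_match (invert : Bool) (ex : List String) :
    pvChoose ex invert = pvSel invert ex := by
  cases ex <;> cases invert <;> simp [pvChoose, pvSel]

lemma pvBody_eq (invert : Bool) (l : List (String × List (String × List (List String)))) :
    pvBody l invert = (l.flatMap (pvHBC invert)).flatten ++ "</font></i></pre>".toList := by
  induction l with
  | nil => simp [pvBody]
  | cons kv rest ih =>
      simp only [pvBody, ih]
      rcases h : PySem.Dict.get? (⟨kv.2⟩ : PySem.Dict String (List (List String))) "examples" with _ | exs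
      · simp only [List.flatMap_cons, pvHBC, h]
        simp
      · simp only [List.flatMap_cons, pvHBC, h]
        rw [PySem.List.foldl_append_eq_flatMap
          (fun examples_list => (pvChoose examples_list invert).map
              (fun phrase => pvEscape (String.toList phrase) ++ ['\n'])) exs []]
        simp only [List.nil_append, sel_match]
        simp [List.flatten_append, List.append_assoc]

lemma qtl_pvG (p : String) :
    PySem.Chars.replace (String.toList (pvG p)) ['"'] pvQ
      = pvEscape (String.toList p) ++ ['\n'] := by
  have h1 : String.toList (pvG p)
      = PySem.Chars.replace (String.toList p) [' ', ' '] ['\n'] ++ ['\n'] := by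
    simp [pvG, PySem.Str.replace]
  rw [h1, qrep_append, escape_eq]
  rfl

lemma map_qrep_pvHB (invert : Bool) (l : List (String × List (String × List (List String)))) :
    (l.flatMap (pvHB invert)).map (fun p => PySem.Chars.replace (String.toList p) ['"'] pvQ)
      = l.flatMap (pvHBC invert) := by
  induction l with
  | nil => simp
  | cons kv rest ih =>
      simp only [List.flatMap_cons, List.map_append, ih]
      congr 1
      rcases h : PySem.Dict.get? (⟨kv.2⟩ : PySem.Dict String (List (List String))) "examples" with _ | exs
      · simp [pvHB, pvHBC, h]
      · simp only [pvHB, pvHBC, h]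
        rw [List.map_flatMap]
        apply List.flatMap_congr  -- pointwise
        intro ex _
        rw [List.map_map]
        apply List.map_congr_left
        intro p _
        simpa [Function.comp] using qtl_pvG p

lemma toList_sjoin (L : List String) :
    String.toList (PySem.Str.join "" L) = (L.map String.toList).flatten := by
  rw [show String.toList (PySem.Str.join "" L) = PySem.Chars.join "".toList (L.map String.toList)
      from PySem.Str.toList_join "" L]
  exact join0_flatten _

-- ===== VERDICT (by name: the statement is the Claim_ definition above) =====
set_option maxHeartbeats 1000000 in
theorem gen_examples_for_connect_spec : Claim_equal_gen_examples_for_connect := by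
  intro translations invert _ _
  unfold Spec_gen_examples_for_connect gen_examples_for_connect gen_examples_for_connect_alt
  rw [outerA]
  show String.ofList (PySem.Chars.replace _ _ _) = _
  rw [show ("\"" : String).toList = ['"'] from rfl,
      show ("&quot;" : String).toList = pvQ from rfl]
  congr 1
  rw [show String.toList (("<i><font color=" ++ pvYellow ++ "><br>\n"
        ++ PySem.Str.join "" (translations.flatMap (pvHB invert))) ++ "</font></i></pre>")
      = "<i><font color=#FCE94F><br>\n".toList
        ++ String.toList (PySem.Str.join "" (translations.flatMap (pvHB invert)))
        ++ "</font></i></pre>".toList by simp [pvYellow]]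
  rw [qrep_append, qrep_append]
  rw [show PySem.Chars.replace ("<i><font color=#FCE94F><br>\n".toList) ['"'] pvQ
      = "<i><font color=#FCE94F><br>\n".toList by decide]
  rw [show PySem.Chars.replace ("</font></i></pre>".toList) ['"'] pvQ
      = "</font></i></pre>".toList by decide]
  rw [toList_sjoin, qrep_flatten, List.map_map]
  rw [show ((fun p => PySem.Chars.replace p ['"'] pvQ) ∘ String.toList)
      = (fun p => PySem.Chars.replace (String.toList p) ['"'] pvQ) from rfl]
  rw [map_qrep_pvHB, pvBody_eq]
  simp
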